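-- pv_equiv track=rewrite | github.com/esquinas/python-basics-exercises | exercises.py | draw_rectangle_borders
-- ===== SOURCE A (Python) =====
-- def string_from_2d(two_d_list):
--     result = ''
--     new_line = '\n'
--
--     for line in two_d_list:
--         result += ''.join(line) + new_line
--
--     return result.rstrip(new_line)
--
-- def draw_rectangle_borders(x, y):
--     """Generates a string with a rectangle borders made of * symbols with `x` columns and `y` rows.
--
--     :param x: Number of columns (width)
--     :param y: Number of rows (height)
--     :return: String containing corresponding rectangle border
--     """
--     SOLID = '*'
--     EMPTY = ' '
--     x_boundaries = 0, x - 1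
--     y_boundaries = 0, y - 1
--
--     result = []
--
--     for curr_y in range(y):
--         result.append([])
--
--         for curr_x in range(x):
--             if curr_y in y_boundaries or curr_x in x_boundaries:
--                 result[-1].append(SOLID)
--             else:
--                 result[-1].append(EMPTY)
--
--     return string_from_2d(result)
-- ===== SOURCE B (Python) =====
-- def draw_rectangle_borders(x, y):
--     """Generates a string with a rectangle borders made of * symbols with `x` columns and `y` rows."""
--     if x <= 0 or y <= 0:
--         return ''
--     full = '*' * x
--     mid = '*' + ' ' * (x - 2) + '*' if x >= 2 else full
--     rows = [full] * y if y <= 2 else [full] + [mid] * (y - 2) + [full]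
--     return '\n'.join(rows)
-- ===== Notes on version B (the rewrite author's own statement) =====
-- stated objective: faster
-- what changed: Instead of a nested per-cell loop building a 2D char grid and joining/rstripping it, B constructs each row string directly ('*'*x for border rows, '*'+' '*(x-2)+'*' for interior rows) and joins y rows, so no per-cell work is done.
import Mathlib
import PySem

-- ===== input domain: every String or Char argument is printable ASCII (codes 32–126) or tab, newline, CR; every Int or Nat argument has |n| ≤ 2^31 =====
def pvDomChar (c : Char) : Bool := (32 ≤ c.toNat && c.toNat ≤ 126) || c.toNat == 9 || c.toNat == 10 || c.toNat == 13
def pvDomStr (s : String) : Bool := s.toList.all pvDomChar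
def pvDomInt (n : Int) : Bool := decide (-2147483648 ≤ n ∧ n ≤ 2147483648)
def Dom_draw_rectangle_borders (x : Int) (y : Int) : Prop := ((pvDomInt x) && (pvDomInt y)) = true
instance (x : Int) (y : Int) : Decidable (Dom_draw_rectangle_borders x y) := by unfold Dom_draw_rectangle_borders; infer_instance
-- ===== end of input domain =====

-- B builds each row string directly (full star rows, star–spaces–star interior rows) instead of
-- A's per-cell nested loop over a 2D grid; objective: faster (no per-cell work).


-- ===== PORT A =====
-- exact port of Python's s.rstrip(chars): drop members of `chars` from the right end only
def pyRstripChars (s : List Char) (chars : List Char) : List Char :=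
  ((s.reverse.dropWhile (fun c => chars.contains c)).reverse)

def string_from_2d (two_d_list : List (List String)) : String :=
  let newLine := "\n"
  let result := two_d_list.foldl (fun result line => result ++ PySem.Str.join "" line ++ newLine) ""
  String.ofList (pyRstripChars result.toList newLine.toList)

def draw_rectangle_borders (x : Int) (y : Int) : String :=
  let SOLID := "*"
  let EMPTY := " "
  let x_boundaries := ((0 : Int), x - 1)
  let y_boundaries := ((0 : Int), y - 1)
  let result := (PySem.List.pyRange 0 y 1).foldl (fun result curr_y =>
      result ++ [(PySem.List.pyRange 0 x 1).foldl (fun row curr_x =>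
        row ++ [if curr_y = y_boundaries.1 ∨ curr_y = y_boundaries.2 ∨
                curr_x = x_boundaries.1 ∨ curr_x = x_boundaries.2 then SOLID else EMPTY]) []]) []
  string_from_2d result

-- ===== PORT B =====
def draw_rectangle_borders_alt (x : Int) (y : Int) : String :=
  if x ≤ 0 ∨ y ≤ 0 then ""
  else
    let full := String.ofList (PySem.List.pyRepeat ['*'] x)
    let mid := if 2 ≤ x then String.ofList ('*' :: (PySem.List.pyRepeat [' '] (x - 2) ++ ['*'])) else full
    let rows := if y ≤ 2 then PySem.List.pyRepeat [full] y
                else [full] ++ PySem.List.pyRepeat [mid] (y - 2) ++ [full]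
    PySem.Str.join "\n" rows

-- ===== PRECONDITION & SPEC =====
def Spec_draw_rectangle_borders (x : Int) (y : Int) (out : String) : Prop := out = draw_rectangle_borders_alt x y
instance (x : Int) (y : Int) (out : String) : Decidable (Spec_draw_rectangle_borders x y out) := by unfold Spec_draw_rectangle_borders; infer_instance

-- ===== CLAIM (what is proved, stated in full; the proofs are below) =====
def Claim_equal_draw_rectangle_borders : Prop := ∀ (x : Int) (y : Int), Dom_draw_rectangle_borders x y → Spec_draw_rectangle_borders x y (draw_rectangle_borders x y)

-- ===== LEMMAS AND PROOFS =====

-- a foldl that appends singletons is a map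
theorem foldl_snoc_map {α β : Type} (f : α → β) (l : List α) (init : List β) :
    l.foldl (fun acc a => acc ++ [f a]) init = init ++ l.map f := by
  induction l generalizing init with
  | nil => simp
  | cons a l ih => simp [List.foldl_cons, ih]

-- the string accumulator of string_from_2d, char-level
theorem foldl_lines_toList (l : List (List String)) (s : String) :
    (l.foldl (fun result line => result ++ PySem.Str.join "" line ++ "\n") s).toList
      = s.toList ++ (l.map (fun line => (PySem.Str.join "" line).toList ++ ['\n'])).flatten := by
  induction l generalizing s with
  | nil => simp
  | cons a l ih => simp [List.foldl_cons, ih, String.toList_append]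

-- the characters of a row/grid of A
def cellC (x y cy cx : Int) : Char :=
  if cy = 0 ∨ cy = y - 1 ∨ cx = 0 ∨ cx = x - 1 then '*' else ' '

def lineC (x y cy : Int) : List Char := (PySem.List.pyRange 0 x 1).map (cellC x y cy)

def fullC (x : Int) : List Char := List.replicate x.toNat '*'

def midC (x : Int) : List Char :=
  if 2 ≤ x then '*' :: (List.replicate (x - 2).toNat ' ' ++ ['*']) else fullC x

theorem toList_cell (x y cy cx : Int) :
    (if cy = 0 ∨ cy = y - 1 ∨ cx = 0 ∨ cx = x - 1 then ("*" : String) else " ").toList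
      = [cellC x y cy cx] := by
  unfold cellC; split_ifs <;> rfl

theorem map_pyRange_const {a b : Int} (f : Int → Char) (c : Char)
    (h : ∀ i, a ≤ i → i < b → f i = c) :
    (PySem.List.pyRange a b 1).map f = List.replicate (b - a).toNat c := by
  have := List.eq_replicate_of_mem (l := (PySem.List.pyRange a b 1).map f) (a := c)
    (by intro u hu
        rcases List.mem_map.mp hu with ⟨i, hi, rfl⟩
        rcases PySem.List.mem_pyRange_one.mp hi with ⟨h1, h2⟩
        exact h i h1 h2)
  simpa [PySem.List.length_pyRange_one] using this

theorem lineC_boundary (x y cy : Int) (h : cy = 0 ∨ cy = y - 1) :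
    lineC x y cy = fullC x := by
  unfold lineC fullC
  have := map_pyRange_const (a := 0) (b := x) (cellC x y cy) '*'
    (by intro i _ _; unfold cellC; rcases h with h | h <;> simp [h])
  simpa using this

theorem lineC_interior (x y cy : Int) (hx : 1 ≤ x) (h0 : cy ≠ 0) (h1 : cy ≠ y - 1) :
    lineC x y cy = midC x := by
  unfold lineC midC
  by_cases h2 : 2 ≤ x
  · simp only [h2, if_true]
    have hsplit : PySem.List.pyRange 0 x 1
        = PySem.List.pyRange 0 1 1 ++ (PySem.List.pyRange 1 (x - 1) 1 ++ PySem.List.pyRange (x - 1) x 1) := by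
      rw [← PySem.List.pyRange_one_append 1 (x - 1) x (by omega) (by omega),
          ← PySem.List.pyRange_one_append 0 1 x (by omega) (by omega)]
    have h01 : PySem.List.pyRange 0 1 1 = [0] := by
      simpa using PySem.List.pyRange_one_singleton 0
    have hlast : PySem.List.pyRange (x - 1) x 1 = [x - 1] := by
      simpa using PySem.List.pyRange_one_singleton (x - 1)
    have hmid : (PySem.List.pyRange 1 (x - 1) 1).map (cellC x y cy)
        = List.replicate (x - 2).toNat ' ' := by
      have := map_pyRange_const (a := 1) (b := x - 1) (cellC x y cy) ' '
        (by intro i hi1 hi2; unfold cellC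
            rw [if_neg]
            rintro (h | h | h | h)
            exacts [h0 h, h1 h, by omega, by omega])
      simpa [show x - 1 - 1 = x - 2 by ring] using this
    have hne : (0:Int) ≠ x - 1 := by omega
    rw [hsplit]
    simp [h01, hlast, hmid, cellC, h0, h1, hne]
  · have hx1 : x = 1 := by omega
    subst hx1
    simp only [h2, if_false]
    unfold fullC
    have := map_pyRange_const (a := 0) (b := 1) (cellC 1 y cy) '*'
      (by intro i hi1 hi2
          have : i = 0 := by omega
          subst this; unfold cellC; simp)
    simpa using this

-- rstrip lemmas
theorem pyRstrip_append_of_last {l : List Char} {c : Char} {chars : List Char}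
    (h : chars.contains c = false) : pyRstripChars (l ++ [c]) chars = l ++ [c] := by
  have h' : c ∉ chars := by simpa using h
  unfold pyRstripChars
  simp [h']

theorem pyRstrip_append_newline (l : List Char) (chars : List Char) {c : Char}
    (h : chars.contains c = true) : pyRstripChars (l ++ [c]) chars = pyRstripChars l chars := by
  have h' : c ∈ chars := by simpa using h
  unfold pyRstripChars
  simp [h']

theorem pyRstrip_append_left {a b : List Char} {chars : List Char}
    (h : pyRstripChars b chars ≠ []) :
    pyRstripChars (a ++ b) chars = a ++ pyRstripChars b chars := by
  unfold pyRstripChars at *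
  have hne : (b.reverse.dropWhile (fun c => chars.contains c)).isEmpty = false := by
    cases hdw : b.reverse.dropWhile (fun c => chars.contains c) with
    | nil => exact absurd (by rw [hdw]; rfl) h
    | cons _ _ => simp
  rw [List.reverse_append, List.dropWhile_append, if_neg (by rw [hne]; simp),
      List.reverse_append, List.reverse_reverse]

theorem pyRstrip_replicate (n : Nat) :
    pyRstripChars (List.replicate n '\n') ['\n'] = [] := by
  unfold pyRstripChars
  rw [List.reverse_replicate]
  rw [List.dropWhile_replicate]
  simp

-- join with '\n' of a cons
theorem join_newline_cons (r r' : List Char) (rs : List (List Char)) :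
    PySem.Chars.join ['\n'] (r :: r' :: rs) = r ++ '\n' :: PySem.Chars.join ['\n'] (r' :: rs) := by
  simp [PySem.Chars.join, List.intercalate, List.intersperse]

theorem join_newline_singleton (r : List Char) : PySem.Chars.join ['\n'] [r] = r := by
  simp [PySem.Chars.join, List.intercalate]

-- rows ending in '*' : rstrip of the newline-terminated concatenation is the '\n'-join
theorem rstrip_flatten_join (rows : List (List Char))
    (hrows : ∀ r ∈ rows, ∃ l, r = l ++ ['*']) (hne : rows ≠ []) :
    pyRstripChars ((rows.map (fun r => r ++ ['\n'])).flatten) ['\n']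
      = PySem.Chars.join ['\n'] rows := by
  induction rows with
  | nil => exact absurd rfl hne
  | cons r rs ih =>
    rcases hrows r (by simp) with ⟨l, rfl⟩
    cases rs with
    | nil =>
      rw [join_newline_singleton]
      simp only [List.map_cons, List.map_nil, List.flatten_cons, List.flatten_nil, List.append_nil]
      rw [show (l ++ ['*']) ++ ['\n'] = ((l ++ ['*']) ++ []) ++ ['\n'] by simp,
          pyRstrip_append_newline _ _ (by decide)]
      simpa using pyRstrip_append_of_last (l := l) (c := '*') (chars := ['\n']) (by decide)
    | cons r' rs' =>
      have ihv := ih (by intro q hq; exact hrows q (by simp [hq])) (by simp)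
      have hjoin_ne : PySem.Chars.join ['\n'] (r' :: rs') ≠ [] := by
        rcases hrows r' (by simp) with ⟨l', hl'⟩
        cases rs' with
        | nil => rw [join_newline_singleton, hl']; simp
        | cons a b => rw [join_newline_cons, hl']; simp
      rw [join_newline_cons,
          show (List.map (fun r => r ++ ['\n']) ((l ++ ['*']) :: r' :: rs')).flatten
             = ((l ++ ['*']) ++ ['\n']) ++ (List.map (fun r => r ++ ['\n']) (r' :: rs')).flatten
            from by simp,
          pyRstrip_append_left (by rw [ihv]; exact hjoin_ne), ihv]
      simp

theorem flatten_map_const {α : Type} (l : List α) (c : Char) :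
    ((l.map fun _ => [c]).flatten) = List.replicate l.length c := by
  induction l with
  | nil => rfl
  | cons a l ih => simp [List.replicate_succ]

-- A, char level: the grid is the map of lineC, newline-terminated, concatenated, right-stripped
theorem A_toList (x y : Int) :
    (draw_rectangle_borders x y).toList
      = pyRstripChars (((PySem.List.pyRange 0 y 1).map (fun cy => lineC x y cy ++ ['\n'])).flatten) ['\n'] := by
  unfold draw_rectangle_borders string_from_2d
  simp only [foldl_snoc_map, List.nil_append]
  rw [foldl_lines_toList, String.toList_ofList]
  have hline : ∀ cy : Int,
      (PySem.Str.join "" ((PySem.List.pyRange 0 x 1).map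
        (fun cx => if cy = 0 ∨ cy = y - 1 ∨ cx = 0 ∨ cx = x - 1 then ("*" : String) else " "))).toList
        = lineC x y cy := by
    intro cy
    rw [PySem.Str.toList_join]
    simp only [List.map_map, Function.comp_def, toList_cell]
    rw [show ((PySem.List.pyRange 0 x 1).map fun cx => [cellC x y cy cx])
          = ((PySem.List.pyRange 0 x 1).map (cellC x y cy)).map (fun c => [c]) from by
        simp [List.map_map]]
    rw [show ("" : String).toList = ([] : List Char) from rfl, PySem.Chars.join_nil_singletons]
    rfl
  simp only [List.map_map, Function.comp_def, hline]
  rfl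

-- the rows of the rectangle, char level
def rowsC (x y : Int) : List (List Char) :=
  if y ≤ 2 then List.replicate y.toNat (fullC x)
  else fullC x :: (List.replicate (y - 2).toNat (midC x) ++ [fullC x])

theorem grid_rows_le2 (x y : Int) (hy2 : y ≤ 2) :
    (PySem.List.pyRange 0 y 1).map (lineC x y) = List.replicate y.toNat (fullC x) := by
  have := List.eq_replicate_of_mem (l := (PySem.List.pyRange 0 y 1).map (lineC x y)) (a := fullC x)
    (by intro r hr
        rcases List.mem_map.mp hr with ⟨cy, hcy, rfl⟩
        rcases PySem.List.mem_pyRange_one.mp hcy with ⟨ha, hb⟩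
        exact lineC_boundary x y cy (by omega))
  simpa [PySem.List.length_pyRange_one] using this

theorem grid_rows_ge3 (x y : Int) (hx : 1 ≤ x) (hy : 3 ≤ y) :
    (PySem.List.pyRange 0 y 1).map (lineC x y)
      = fullC x :: (List.replicate (y - 2).toNat (midC x) ++ [fullC x]) := by
  have hsplit : PySem.List.pyRange 0 y 1
      = PySem.List.pyRange 0 1 1 ++ (PySem.List.pyRange 1 (y - 1) 1 ++ PySem.List.pyRange (y - 1) y 1) := by
    rw [← PySem.List.pyRange_one_append 1 (y - 1) y (by omega) (by omega),
        ← PySem.List.pyRange_one_append 0 1 y (by omega) (by omega)]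
  have h01 : PySem.List.pyRange 0 1 1 = [0] := by
    simpa using PySem.List.pyRange_one_singleton 0
  have hlast : PySem.List.pyRange (y - 1) y 1 = [y - 1] := by
    simpa using PySem.List.pyRange_one_singleton (y - 1)
  have hmid : (PySem.List.pyRange 1 (y - 1) 1).map (lineC x y)
      = List.replicate (y - 2).toNat (midC x) := by
    have := List.eq_replicate_of_mem
      (l := (PySem.List.pyRange 1 (y - 1) 1).map (lineC x y)) (a := midC x)
      (by intro r hr
          rcases List.mem_map.mp hr with ⟨cy, hcy, rfl⟩
          rcases PySem.List.mem_pyRange_one.mp hcy with ⟨ha, hb⟩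
          exact lineC_interior x y cy hx (by omega) (by omega))
    simpa [PySem.List.length_pyRange_one, show y - 1 - 1 = y - 2 by ring] using this
  rw [hsplit]
  simp [h01, hlast, hmid, lineC_boundary x y 0 (Or.inl rfl), lineC_boundary x y (y - 1) (Or.inr rfl)]

theorem fullC_ends (x : Int) (hx : 1 ≤ x) : ∃ l, fullC x = l ++ ['*'] := by
  refine ⟨List.replicate (x.toNat - 1) '*', ?_⟩
  unfold fullC
  conv_lhs => rw [show x.toNat = x.toNat - 1 + 1 from by omega]
  rw [List.replicate_succ']

theorem midC_ends (x : Int) (hx : 1 ≤ x) : ∃ l, midC x = l ++ ['*'] := by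
  unfold midC
  split_ifs with h
  · exact ⟨'*' :: List.replicate (x - 2).toNat ' ', by simp⟩
  · exact fullC_ends x hx

theorem rowsC_ends (x y : Int) (hx : 1 ≤ x) : ∀ r ∈ rowsC x y, ∃ l, r = l ++ ['*'] := by
  intro r hr
  unfold rowsC at hr
  split_ifs at hr with h
  · rw [List.eq_of_mem_replicate hr]; exact fullC_ends x hx
  · rcases List.mem_cons.mp hr with rfl | hr
    · exact fullC_ends x hx
    · rcases List.mem_append.mp hr with hr | hr
      · rw [List.eq_of_mem_replicate hr]; exact midC_ends x hx
      · rw [List.mem_singleton.mp hr]; exact fullC_ends x hx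

theorem B_toList (x y : Int) (hx : 1 ≤ x) (hy : 1 ≤ y) :
    (draw_rectangle_borders_alt x y).toList = PySem.Chars.join ['\n'] (rowsC x y) := by
  unfold draw_rectangle_borders_alt rowsC
  rw [if_neg (by omega)]
  rw [PySem.Str.toList_join]
  by_cases h2 : y ≤ 2 <;>
    simp [h2, PySem.List.pyRepeat_singleton, List.map_replicate, String.toList_ofList,
      fullC, midC, apply_ite String.toList]

theorem rowsC_ne_nil (x y : Int) (hy : 1 ≤ y) : rowsC x y ≠ [] := by
  unfold rowsC
  split_ifs with h
  · simp [show y.toNat ≠ 0 by omega]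
  · simp

-- ===== VERDICT (by name: the statement is the Claim_ definition above) =====
theorem draw_rectangle_borders_spec : Claim_equal_draw_rectangle_borders := by
  unfold Claim_equal_draw_rectangle_borders
  intro x y _
  unfold Spec_draw_rectangle_borders
  rw [← String.toList_inj, A_toList]
  by_cases hy : y ≤ 0
  · rw [PySem.List.pyRange_one_eq_nil (by omega)]
    unfold draw_rectangle_borders_alt
    rw [if_pos (Or.inr hy)]
    rfl
  by_cases hx : x ≤ 0
  · have hempty : ∀ cy : Int, lineC x y cy = [] := by
      intro cy
      unfold lineC
      rw [PySem.List.pyRange_one_eq_nil (by omega)]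
      rfl
    simp only [hempty, List.nil_append]
    rw [flatten_map_const, pyRstrip_replicate]
    unfold draw_rectangle_borders_alt
    rw [if_pos (Or.inl hx)]
    rfl
  · have hgrid : (PySem.List.pyRange 0 y 1).map (lineC x y) = rowsC x y := by
      unfold rowsC
      split_ifs with h2
      · exact grid_rows_le2 x y h2
      · exact grid_rows_ge3 x y (by omega) (by omega)
    rw [show ((PySem.List.pyRange 0 y 1).map (fun cy => lineC x y cy ++ ['\n']))
          = (((PySem.List.pyRange 0 y 1).map (lineC x y)).map (fun r => r ++ ['\n'])) from by
        simp [List.map_map]]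
    rw [hgrid, rstrip_flatten_join _ (rowsC_ends x y (by omega)) (rowsC_ne_nil x y (by omega)),
        B_toList x y (by omega) (by omega)]
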